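-- pv_equiv track=rewrite | github.com/GrigoryM1A1/ASD-AGH-2022 | exam-time/dp/temple-offerings.py | lin_temple_offering
-- ===== SOURCE A (Python) =====
-- def lin_temple_offering(n, Heights):
--     # chcemy zrobic to samo ale zeby szybciej dostawac left i right
--     lefts = [-1 for _ in range(n)]
--     rights = [-1 for _ in range(n)]
--
--     lefts[0] = rights[-1] = 1
--
--     for i in range(1, n):
--         if Heights[i-1] < Heights[i]:
--             lefts[i] = lefts[i-1] + 1
--         else:
--             lefts[i] = 1
--
--     for i in range(n-2, -1, -1):
--         if Heights[i+1] < Heights[i]: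
--             rights[i] = rights[i+1] + 1
--         else:
--             rights[i] = 1
--
--     sum_ = 0
--     for i in range(n):
--         sum_ += max(lefts[i], rights[i])
--     return sum_
-- ===== SOURCE B (Python) =====
-- def lin_temple_offering(n, Heights):
--     # O(1)-space single-pass slope counting ("candy" algorithm) instead of
--     # building lefts/rights arrays.
--     total = 1
--     up = down = peak = 0
--     for i in range(1, n):
--         if Heights[i - 1] < Heights[i]:
--             up += 1
--             down = 0
--             peak = up
--             total += 1 + up
--         elif Heights[i - 1] == Heights[i]:
--             up = down = peak = 0
--             total += 1
--         else:
--             up = 0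
--             down += 1
--             total += 1 + down - (1 if peak >= down else 0)
--     return total
-- ===== Notes on version B (the rewrite author's own statement) =====
-- stated objective: alternative
-- what changed: Replaces A's three passes over two O(n) auxiliary arrays (forward lefts pass, backward rights pass, then a summing pass) by the classic single-pass O(1)-space slope-counting ('candy') loop maintaining up/down/peak counters and a running total.
import Mathlib
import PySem

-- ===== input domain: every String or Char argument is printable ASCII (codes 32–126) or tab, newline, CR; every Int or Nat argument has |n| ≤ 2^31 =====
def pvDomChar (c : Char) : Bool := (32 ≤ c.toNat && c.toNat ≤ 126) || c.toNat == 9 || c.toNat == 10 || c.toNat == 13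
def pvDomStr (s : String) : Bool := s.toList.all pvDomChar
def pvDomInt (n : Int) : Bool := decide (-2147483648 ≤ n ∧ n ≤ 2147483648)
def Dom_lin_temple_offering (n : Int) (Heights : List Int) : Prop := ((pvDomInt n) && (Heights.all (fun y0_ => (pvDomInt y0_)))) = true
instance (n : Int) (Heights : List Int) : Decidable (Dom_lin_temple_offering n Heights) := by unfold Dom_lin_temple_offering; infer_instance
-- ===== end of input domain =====

-- B replaces A's three passes over two O(n) arrays by the single-pass O(1)-space
-- slope-counting ("candy") loop; same return value on every input A accepts.

-- ===== PORT A =====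
def lin_temple_offering (n : Int) (Heights : List Int) : Int :=
  -- lefts = [-1 for _ in range(n)]; rights = [-1 for _ in range(n)]
  let lefts := (PySem.List.pyRange 0 n 1).map (fun _ => (-1 : Int))
  let rights := (PySem.List.pyRange 0 n 1).map (fun _ => (-1 : Int))
  -- lefts[0] = rights[-1] = 1  (IndexError when n <= 0: those inputs are outside Pre_)
  let lefts := PySem.List.pySetD lefts 0 1
  let rights := PySem.List.pySetD rights (-1) 1
  -- for i in range(1, n): lefts[i] = lefts[i-1]+1 if Heights[i-1] < Heights[i] else 1
  let lefts := (PySem.List.pyRange 1 n 1).foldl (fun lefts i =>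
    if PySem.List.pyGetD Heights (i-1) 0 < PySem.List.pyGetD Heights i 0 then
      PySem.List.pySetD lefts i (PySem.List.pyGetD lefts (i-1) 0 + 1)
    else
      PySem.List.pySetD lefts i 1) lefts
  -- for i in range(n-2, -1, -1): rights[i] = rights[i+1]+1 if Heights[i+1] < Heights[i] else 1
  let rights := (PySem.List.pyRange (n-2) (-1) (-1)).foldl (fun rights i =>
    if PySem.List.pyGetD Heights (i+1) 0 < PySem.List.pyGetD Heights i 0 then
      PySem.List.pySetD rights i (PySem.List.pyGetD rights (i+1) 0 + 1)
    else
      PySem.List.pySetD rights i 1) rights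
  -- sum_ = 0; for i in range(n): sum_ += max(lefts[i], rights[i])
  (PySem.List.pyRange 0 n 1).foldl (fun sum_ i =>
    sum_ + max (PySem.List.pyGetD lefts i 0) (PySem.List.pyGetD rights i 0)) 0

-- ===== PORT B =====
def lin_temple_offering_alt (n : Int) (Heights : List Int) : Int :=
  -- total = 1; up = down = peak = 0; single pass over i in range(1, n)
  let st := (PySem.List.pyRange 1 n 1).foldl (fun (st : Int × Int × Int × Int) i =>
    let (total, up, down, peak) := st
    if PySem.List.pyGetD Heights (i-1) 0 < PySem.List.pyGetD Heights i 0 then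
      (total + 1 + (up + 1), up + 1, 0, up + 1)
    else if PySem.List.pyGetD Heights (i-1) 0 = PySem.List.pyGetD Heights i 0 then
      (total + 1, 0, 0, 0)
    else
      (total + 1 + (down + 1) - (if peak ≥ down + 1 then 1 else 0), 0, down + 1, peak))
    (1, 0, 0, 0)
  st.1

-- ===== PRECONDITION & SPEC =====
-- Pre_ excludes exactly the inputs on which the Python A raises IndexError:
-- n <= 0 (lefts[0] on an empty list) and n > len(Heights) with n >= 2 (Heights[i] out of
-- range; for n == 1 the loops never read Heights, so A returns 1 for any Heights).
def Pre_lin_temple_offering (n : Int) (Heights : List Int) : Prop :=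
  1 ≤ n ∧ (n ≤ (Heights.length : Int) ∨ n = 1)
instance (n : Int) (Heights : List Int) : Decidable (Pre_lin_temple_offering n Heights) := by
  unfold Pre_lin_temple_offering; infer_instance
def pvWitness_lin_temple_offering : Int × List Int := (3, [2, 1, 4])

def Spec_lin_temple_offering (n : Int) (Heights : List Int) (out : Int) : Prop := out = lin_temple_offering_alt n Heights
instance (n : Int) (Heights : List Int) (out : Int) : Decidable (Spec_lin_temple_offering n Heights out) := by unfold Spec_lin_temple_offering; infer_instance

-- ===== CLAIM (what is proved, stated in full; the proofs are below) =====
def Claim_equal_lin_temple_offering : Prop := ∀ (n : Int) (Heights : List Int), Dom_lin_temple_offering n Heights → Pre_lin_temple_offering n Heights → Spec_lin_temple_offering n Heights (lin_temple_offering n Heights)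

-- ===== LEMMAS AND PROOFS =====

-- Functional characterisations of A's two arrays.
-- leftsF H = the lefts array: length of the strictly increasing run ending at each index.
def leftsGo (p pl : Int) : List Int → List Int
  | [] => []
  | h :: t => (if p < h then pl + 1 else 1) :: leftsGo h (if p < h then pl + 1 else 1) t

def leftsF : List Int → List Int
  | [] => []
  | h :: t => 1 :: leftsGo h 1 t

-- rightsF H = the rights array: length of the strictly decreasing run starting at each index.
def rightsF : List Int → List Int
  | [] => []
  | [_] => [1]
  | a :: b :: t => (if b < a then (rightsF (b :: t)).headI + 1 else 1) :: rightsF (b :: t)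

def sumLR (H : List Int) : Int := (List.zipWith max (leftsF H) (rightsF H)).sum

-- [k, k-1, ..., 1] : the rights values of a trailing strictly decreasing run.
def descList : Nat → List Int
  | 0 => []
  | k + 1 => ((k : Int) + 1) :: descList k

-- bump r increments exactly the entries whose decreasing run reaches the end of the list.
def bump : List Int → List Int
  | [] => []
  | x :: t => (if x = (t.length : Int) + 1 then x + 1 else x) :: bump t

theorem leftsGo_length (p pl : Int) (t : List Int) : (leftsGo p pl t).length = t.length := by
  induction t generalizing p pl with
  | nil => rfl
  | cons h t ih => simp [leftsGo, ih]

theorem leftsF_length (H : List Int) : (leftsF H).length = H.length := by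
  cases H with
  | nil => rfl
  | cons h t => simp [leftsF, leftsGo_length]

theorem rightsF_length (H : List Int) : (rightsF H).length = H.length := by
  induction H with
  | nil => rfl
  | cons a t ih =>
    cases t with
    | nil => rfl
    | cons b t' => simp [rightsF] at ih ⊢; omega

theorem descList_length (k : Nat) : (descList k).length = k := by
  induction k with
  | zero => rfl
  | succ k ih => simp [descList, ih]

-- snoc lemma for leftsGo / leftsF
theorem leftsGo_snoc (t : List Int) (p pl h : Int) :
    leftsGo p pl (t ++ [h]) =
      leftsGo p pl t ++
        [if ((p :: t).getLast?.getD 0) < h then ((pl :: leftsGo p pl t).getLast?.getD 0) + 1 else 1] := by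
  induction t generalizing p pl with
  | nil => simp [leftsGo]
  | cons x t' ih =>
    simp only [List.cons_append, leftsGo, ih x (if p < x then pl + 1 else 1)]
    cases t' <;> simp [leftsGo]

theorem leftsF_snoc (Q : List Int) (h : Int) (hQ : Q ≠ []) :
    leftsF (Q ++ [h]) =
      leftsF Q ++ [if (Q.getLast?.getD 0) < h then ((leftsF Q).getLast?.getD 0) + 1 else 1] := by
  cases Q with
  | nil => exact absurd rfl hQ
  | cons q t => simp only [List.cons_append, leftsF, leftsGo_snoc]

-- snoc lemmas for rightsF
theorem rightsF_ne_nil (Q : List Int) (hQ : Q ≠ []) : rightsF Q ≠ [] := by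
  have := rightsF_length Q
  intro hc; rw [hc] at this; simp at this; exact hQ (List.length_eq_zero_iff.mp this.symm)

theorem rightsF_snoc_ge (Q : List Int) (h pr : Int) (hpr : Q.getLast? = some pr) (hge : ¬ h < pr) :
    rightsF (Q ++ [h]) = rightsF Q ++ [1] := by
  induction Q with
  | nil => simp at hpr
  | cons a t ih =>
    cases t with
    | nil =>
      simp only [List.getLast?_singleton, Option.some_inj] at hpr
      subst hpr
      simp [rightsF, hge]
    | cons b t' =>
      have hpr' : (b :: t').getLast? = some pr := by
        simpa [List.getLast?_cons_cons] using hpr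
      have ih' := ih hpr'
      simp only [List.cons_append] at ih' ⊢
      rw [show rightsF (a :: b :: (t' ++ [h])) = (if b < a then (rightsF (b :: (t' ++ [h]))).headI + 1 else 1) :: rightsF (b :: (t' ++ [h])) from rfl]
      rw [ih']
      have hne := rightsF_ne_nil (b :: t') (by simp)
      rw [show rightsF (a :: b :: t') = (if b < a then (rightsF (b :: t')).headI + 1 else 1) :: rightsF (b :: t') from rfl]
      obtain ⟨x0, X', hX⟩ := List.exists_cons_of_ne_nil hne
      simp [hX]

theorem rightsF_snoc_lt (Q : List Int) (h pr : Int) (hpr : Q.getLast? = some pr) (hlt : h < pr) :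
    rightsF (Q ++ [h]) = bump (rightsF Q) ++ [1] := by
  induction Q with
  | nil => simp at hpr
  | cons a t ih =>
    cases t with
    | nil =>
      simp only [List.getLast?_singleton, Option.some_inj] at hpr
      subst hpr
      simp [rightsF, bump, hlt]
    | cons b t' =>
      have hpr' : (b :: t').getLast? = some pr := by
        simpa [List.getLast?_cons_cons] using hpr
      have ih' := ih hpr'
      have hlen : (rightsF (b :: t')).length = t'.length + 1 := by
        simpa using rightsF_length (b :: t')
      obtain ⟨x0, X', hX⟩ : ∃ x0 X', rightsF (b :: t') = x0 :: X' :=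
        List.exists_cons_of_ne_nil (rightsF_ne_nil (b :: t') (by simp))
      have hX' : X'.length = t'.length := by rw [hX] at hlen; simpa using hlen
      simp only [List.cons_append] at ih' ⊢
      rw [show rightsF (a :: b :: (t' ++ [h])) = (if b < a then (rightsF (b :: (t' ++ [h]))).headI + 1 else 1) :: rightsF (b :: (t' ++ [h])) from rfl]
      rw [ih',
          show rightsF (a :: b :: t') = (if b < a then (rightsF (b :: t')).headI + 1 else 1) :: rightsF (b :: t') from rfl]
      rw [hX]
      by_cases hba : b < a
      · simp only [hba, if_true, bump, List.headI, List.cons_append, List.length_cons, hX']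
        congr 1
        split_ifs <;> omega
      · simp only [hba, if_false, bump, List.headI, List.cons_append, List.length_cons, hX']
        congr 1

theorem bump_append (P S : List Int)
    (hP : ∀ j (hj : j < P.length), P[j] < ((P.length + S.length : Nat) : Int) - j) :
    bump (P ++ S) = P ++ bump S := by
  induction P with
  | nil => rfl
  | cons x P' ih =>
    have h0 := hP 0 (by simp)
    simp only [List.getElem_cons_zero, List.length_cons] at h0
    have harg : ∀ j (hj : j < P'.length), P'[j] < ((P'.length + S.length : Nat) : Int) - j := by
      intro j hj
      have := hP (j+1) (by simp only [List.length_cons]; omega)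
      simp only [List.getElem_cons_succ, List.length_cons] at this
      push_cast at this ⊢
      omega
    simp only [List.cons_append, bump, ih harg, List.length_append]
    have hx : ¬ (x = (P'.length : Int) + (S.length : Int) + 1) := by
      push_cast at h0; omega
    simp [hx]

theorem bump_descList (k : Nat) : bump (descList k) ++ [1] = descList (k + 1) := by
  induction k with
  | zero => rfl
  | succ k ih =>
    rw [show descList (k+1) = ((k : Int) + 1) :: descList k from rfl]
    simp only [bump, descList_length, List.cons_append, ih]
    rw [show descList (k+1+1) = ((k : Int) + 1 + 1) :: descList (k+1) from rfl]
    simp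

theorem zip_rep_desc (k : Nat) :
    List.zipWith max (List.replicate k 1) (descList k) = descList k := by
  induction k with
  | zero => rfl
  | succ k ih =>
    rw [show descList (k+1) = ((k : Int) + 1) :: descList k from rfl]
    simp only [List.replicate_succ, List.zipWith_cons_cons, ih]
    congr 1
    omega

theorem rightsF_bound (Q : List Int) : ∀ j (hj : j < (rightsF Q).length),
    (rightsF Q)[j] ≤ ((Q.length : Int)) - j := by
  induction Q with
  | nil => intro j hj; simp [rightsF] at hj
  | cons a t ih =>
    cases t with
    | nil =>
      intro j hj
      have hj0 : j = 0 := by simpa [rightsF] using hj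
      subst hj0; simp [rightsF]
    | cons b t' =>
      intro j hj
      match j with
      | 0 =>
        have h0 := ih 0 (by have := rightsF_length (b :: t'); simp at this ⊢; omega)
        have hh : (rightsF (b :: t')).headI = (rightsF (b :: t'))[0]'(by have := rightsF_length (b :: t'); simp [this]) := by
          obtain ⟨x0, X', hX⟩ := List.exists_cons_of_ne_nil (rightsF_ne_nil (b :: t') (by simp))
          simp [hX]
        simp only [show rightsF (a :: b :: t') = (if b < a then (rightsF (b :: t')).headI + 1 else 1) :: rightsF (b :: t') from rfl, List.getElem_cons_zero, List.length_cons]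
        rw [hh]
        simp only [List.length_cons] at h0
        push_cast at h0 ⊢
        split_ifs <;> omega
      | Nat.succ j' =>
        have hj' : j' < (rightsF (b :: t')).length := by
          have := rightsF_length (a :: b :: t')
          have := rightsF_length (b :: t')
          simp at *; omega
        have := ih j' hj'
        simp only [List.length_cons] at this
        simp only [show rightsF (a :: b :: t') = (if b < a then (rightsF (b :: t')).headI + 1 else 1) :: rightsF (b :: t') from rfl, List.getElem_cons_succ, List.length_cons]
        push_cast at this ⊢
        omega

theorem zip_sum_split (A1 A2 X Y : List Int) (h : A1.length = A2.length) :
    (List.zipWith max (A1 ++ X) (A2 ++ Y)).sum =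
      (List.zipWith max A1 A2).sum + (List.zipWith max X Y).sum := by
  rw [List.zipWith_append h, List.sum_append]

theorem descList_succ (k : Nat) : descList (k + 1) = ((k : Int) + 1) :: descList k := rfl

-- The invariant carried through B's single pass.
def CandyInv (Q : List Int) (u d p t : Int) : Prop :=
  ∃ (un dn pn : Nat) (Pl Pr : List Int),
    u = un ∧ d = dn ∧ p = pn ∧
    leftsF Q = Pl ++ [(pn : Int) + 1] ++ List.replicate dn 1 ∧
    rightsF Q = Pr ++ descList (dn + 1) ∧
    Pl.length = Pr.length ∧
    (∀ j (hj : j < Pr.length), Pr[j] < ((Q.length : Int)) - j) ∧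
    (leftsF Q).getLast? = some ((un : Int) + 1) ∧
    t = sumLR Q

-- candy recursion on lists (the functional form of B's loop)
def candyGo (prev u d p t : Int) : List Int → Int
  | [] => t
  | h :: r =>
    if prev < h then candyGo h (u + 1) 0 (u + 1) (t + 1 + (u + 1)) r
    else if prev = h then candyGo h 0 0 0 (t + 1) r
    else candyGo h 0 (d + 1) p (t + 1 + (d + 1) - (if p ≥ d + 1 then 1 else 0)) r

theorem candyGo_sumLR (R : List Int) : ∀ (Q : List Int) (pr u d p t : Int),
    Q.getLast? = some pr → CandyInv Q u d p t → candyGo pr u d p t R = sumLR (Q ++ R) := by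
  induction R with
  | nil =>
    intro Q pr u d p t hpr hinv
    obtain ⟨un, dn, pn, Pl, Pr, hu, hd, hp, hL, hR, hlen, hshort, hlast, ht⟩ := hinv
    simp [candyGo, ht]
  | cons h R' IH =>
    intro Q pr u d p t hpr hinv
    obtain ⟨un, dn, pn, Pl, Pr, hu, hd, hp, hL, hR, hlen, hshort, hlast, ht⟩ := hinv
    subst hu hd hp ht
    have hQne : Q ≠ [] := by intro hc; rw [hc] at hpr; simp at hpr
    have hprd : Q.getLast?.getD 0 = pr := by rw [hpr]; rfl
    have hlenL : (leftsF Q).length = Q.length := leftsF_length Q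
    have hlenR : (rightsF Q).length = Q.length := rightsF_length Q
    have hlastq : (Q ++ [h]).getLast? = some h := by simp
    have hassoc : Q ++ h :: R' = (Q ++ [h]) ++ R' := by simp
    rw [hassoc]
    simp only [candyGo]
    by_cases hlt : pr < h
    · rw [if_pos hlt]
      have hL' : leftsF (Q ++ [h]) = leftsF Q ++ [(un : Int) + 1 + 1] := by
        rw [leftsF_snoc Q h hQne, hprd, if_pos hlt, hlast]; rfl
      have hR' : rightsF (Q ++ [h]) = rightsF Q ++ [1] :=
        rightsF_snoc_ge Q h pr hpr (by omega)
      apply IH (Q ++ [h]) h _ _ _ _ hlastq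
      refine ⟨un + 1, 0, un + 1, leftsF Q, rightsF Q, by push_cast; ring, rfl, by push_cast; ring, ?_, ?_, by omega, ?_, ?_, ?_⟩
      · rw [hL']; push_cast; simp
      · rw [hR']; rfl
      · intro j hj
        have := rightsF_bound Q j hj
        simp only [List.length_append, List.length_cons, List.length_nil]
        push_cast
        omega
      · rw [hL']; simp
      · rw [show sumLR (Q ++ [h]) = (List.zipWith max (leftsF (Q ++ [h])) (rightsF (Q ++ [h]))).sum from rfl,
            hL', hR', zip_sum_split _ _ _ _ (by omega)]
        rw [show sumLR Q = (List.zipWith max (leftsF Q) (rightsF Q)).sum from rfl]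
        simp only [List.zipWith_cons_cons, List.zipWith_nil_right, List.sum_cons, List.sum_nil]
        have : max ((un : Int) + 1 + 1) 1 = (un : Int) + 1 + 1 := by omega
        rw [this]; ring
    · rw [if_neg hlt]
      by_cases heq : pr = h
      · rw [if_pos heq]
        have hL' : leftsF (Q ++ [h]) = leftsF Q ++ [1] := by
          rw [leftsF_snoc Q h hQne, hprd, if_neg hlt]
        have hR' : rightsF (Q ++ [h]) = rightsF Q ++ [1] :=
          rightsF_snoc_ge Q h pr hpr (by omega)
        apply IH (Q ++ [h]) h _ _ _ _ hlastq
        refine ⟨0, 0, 0, leftsF Q, rightsF Q, rfl, rfl, rfl, ?_, ?_, by omega, ?_, ?_, ?_⟩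
        · rw [hL']; simp
        · rw [hR']; rfl
        · intro j hj
          have := rightsF_bound Q j hj
          simp only [List.length_append, List.length_cons, List.length_nil]
          push_cast
          omega
        · rw [hL']; simp
        · rw [show sumLR (Q ++ [h]) = (List.zipWith max (leftsF (Q ++ [h])) (rightsF (Q ++ [h]))).sum from rfl,
              hL', hR', zip_sum_split _ _ _ _ (by omega)]
          rw [show sumLR Q = (List.zipWith max (leftsF Q) (rightsF Q)).sum from rfl]
          simp
      · rw [if_neg heq]
        have hgt : h < pr := by omega
        have hL' : leftsF (Q ++ [h]) = Pl ++ [(pn : Int) + 1] ++ List.replicate (dn + 1) 1 := by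
          rw [leftsF_snoc Q h hQne, hprd, if_neg hlt, hL]
          simp only [List.replicate_succ', List.append_assoc]
        have hlen' : Pl.length + 1 + dn = Q.length := by
          have h2 : (leftsF Q).length = (Pl ++ [(pn : Int) + 1] ++ List.replicate dn 1).length := by
            rw [hL]
          simp at h2
          omega
        have hlenPr : Pr.length + (dn + 1) = Q.length := by
          have h2 : (rightsF Q).length = (Pr ++ descList (dn + 1)).length := by rw [hR]
          simp [descList_length] at h2
          omega
        have hR' : rightsF (Q ++ [h]) = Pr ++ descList (dn + 1 + 1) := by
          rw [rightsF_snoc_lt Q h pr hpr hgt, hR,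
              bump_append Pr (descList (dn + 1)) (by
                intro j hj
                have := hshort j hj
                simp only [descList_length]
                push_cast at this ⊢
                omega),
              List.append_assoc, bump_descList]
        apply IH (Q ++ [h]) h _ _ _ _ hlastq
        refine ⟨0, dn + 1, pn, Pl, Pr, rfl, by push_cast; ring, rfl, hL', hR', by omega, ?_, ?_, ?_⟩
        · intro j hj
          have := hshort j hj
          simp only [List.length_append, List.length_cons, List.length_nil]
          push_cast at this ⊢
          omega
        · rw [hL', List.replicate_succ',
              show Pl ++ [(pn : Int) + 1] ++ (List.replicate dn 1 ++ [1]) =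
                (Pl ++ ([(pn : Int) + 1] ++ List.replicate dn 1)) ++ [1] by simp]
          exact List.getLast?_concat
        · -- the sum computation
          rw [show sumLR (Q ++ [h]) = (List.zipWith max (leftsF (Q ++ [h])) (rightsF (Q ++ [h]))).sum from rfl,
              hL', hR']
          rw [show sumLR Q = (List.zipWith max (leftsF Q) (rightsF Q)).sum from rfl, hL, hR]
          rw [List.append_assoc, List.append_assoc,
              zip_sum_split _ _ _ _ hlen, zip_sum_split _ _ _ _ hlen]
          rw [descList_succ (dn + 1), descList_succ dn]
          simp only [List.replicate_succ, List.cons_append, List.nil_append,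
            List.zipWith_cons_cons, List.sum_cons, zip_rep_desc]
          push_cast
          omega

-- ===== bridging A's loops to the functional arrays =====

theorem lefts_loop (H : List Int) (m : Nat) (hm : 1 ≤ m) (hlen : m ≤ H.length) :
    ∀ k, 1 ≤ k → k ≤ m →
      (PySem.List.pyRange 1 (k : Int) 1).foldl (fun lefts i =>
        if PySem.List.pyGetD H (i-1) 0 < PySem.List.pyGetD H i 0 then
          PySem.List.pySetD lefts i (PySem.List.pyGetD lefts (i-1) 0 + 1)
        else
          PySem.List.pySetD lefts i 1) ((1 : Int) :: List.replicate (m - 1) (-1)) =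
      leftsF (H.take k) ++ List.replicate (m - k) (-1) := by
  intro k
  induction k with
  | zero => intro h; omega
  | succ k ih =>
    intro _ hkm
    by_cases hk0 : k = 0
    · subst hk0
      rw [show (((0:Nat)+1 : Nat) : Int) = 1 by norm_num, PySem.List.pyRange_one_eq_nil (by omega)]
      obtain ⟨a, t, rfl⟩ := List.exists_cons_of_ne_nil
        (show H ≠ [] by intro hc; subst hc; simp at hlen; omega)
      simp [leftsF, leftsGo]
    · have hk1 : 1 ≤ k := by omega
      have hklt : k < H.length := by omega
      have hQne : H.take k ≠ [] := by
        apply List.ne_nil_of_length_pos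
        simp only [List.length_take]
        omega
      have hQlen : (leftsF (H.take k)).length = k := by
        rw [leftsF_length]; simp; omega
      have ihh := ih hk1 (by omega)
      rw [show ((k+1 : Nat) : Int) = (k : Int) + 1 by push_cast; ring,
          PySem.List.pyRange_one_succ_right (by exact_mod_cast hk1),
          List.foldl_append, ihh, List.foldl_cons, List.foldl_nil]
      -- the reads from Heights
      have e1 : ((k : Int) - 1) = ((k - 1 : Nat) : Int) := by
        push_cast [Nat.cast_sub hk1]; ring
      have eH1 : PySem.List.pyGetD H ((k : Int) - 1) 0 = H[k-1]'(by omega) := by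
        rw [e1, PySem.List.pyGetD_natCast, List.getD_eq_getElem _ _ (by omega)]
      have eH2 : PySem.List.pyGetD H (k : Int) 0 = H[k]'(by omega) := by
        rw [PySem.List.pyGetD_natCast, List.getD_eq_getElem _ _ (by omega)]
      -- the read of lefts[i-1]
      have eL : PySem.List.pyGetD (leftsF (H.take k) ++ List.replicate (m - k) (-1)) ((k : Int) - 1) 0
          = (leftsF (H.take k))[k-1]'(by omega) := by
        rw [e1, PySem.List.pyGetD_natCast, List.getD_eq_getElem _ _ (by simp [hQlen]; omega),
            List.getElem_append_left (by omega)]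
      -- take (k+1) and the snoc form of leftsF
      have etake : H.take (k+1) = H.take k ++ [H[k]'(by omega)] :=
        List.take_succ_eq_append_getElem hklt
      have eQlast : (H.take k).getLast?.getD 0 = H[k-1]'(by omega) := by
        rw [List.getLast?_eq_getElem?,
            show (H.take k).length - 1 = k - 1 by simp only [List.length_take]; omega,
            List.getElem?_eq_getElem (by simp only [List.length_take]; omega)]
        simp [List.getElem_take]
      have eLlast : (leftsF (H.take k)).getLast?.getD 0 = (leftsF (H.take k))[k-1]'(by omega) := by
        rw [List.getLast?_eq_getElem?,
            show (leftsF (H.take k)).length - 1 = k - 1 by omega,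
            List.getElem?_eq_getElem (by omega)]
        simp
      have hrep : List.replicate (m - k) (-1 : Int) = -1 :: List.replicate (m - (k+1)) (-1) := by
        rw [show m - k = (m - (k+1)) + 1 by omega, List.replicate_succ]
      rw [etake, leftsF_snoc _ _ hQne, eQlast, eLlast, eH1, eH2]
      by_cases hc : H[k-1]'(by omega) < H[k]'(by omega)
      · rw [if_pos hc, if_pos hc, eL, PySem.List.pySetD_natCast, List.set_append, hrep]
        simp [hQlen]
      · rw [if_neg hc, if_neg hc, PySem.List.pySetD_natCast, List.set_append, hrep]
        simp [hQlen]

theorem rights_loop (H : List Int) (m : Nat) (hm : 1 ≤ m) (hlen : m ≤ H.length) :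
    ∀ k, k ≤ m - 1 →
      (PySem.List.pyRange ((k : Int) - 1) (-1) (-1)).foldl (fun rights i =>
        if PySem.List.pyGetD H (i+1) 0 < PySem.List.pyGetD H i 0 then
          PySem.List.pySetD rights i (PySem.List.pyGetD rights (i+1) 0 + 1)
        else
          PySem.List.pySetD rights i 1)
        (List.replicate k (-1) ++ rightsF ((H.take m).drop k)) =
      rightsF (H.take m) := by
  have hH'len : (H.take m).length = m := by simp only [List.length_take]; omega
  intro k
  induction k with
  | zero =>
    intro _
    rw [show ((0:Nat) : Int) - 1 = -1 by norm_num,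
        PySem.List.pyRange_neg_one_eq_nil (by norm_num)]
    simp
  | succ k ih =>
    intro hk
    have hk2 : k + 2 ≤ m := by omega
    have e1 : ((k+1 : Nat) : Int) - 1 = (k : Int) := by push_cast; ring
    rw [e1, PySem.List.pyRange_neg_one_cons (by omega), List.foldl_cons]
    have hd1 : (H.take m).drop k = H[k]'(by omega) :: (H.take m).drop (k+1) := by
      rw [List.drop_eq_getElem_cons (by omega)]
      congr 1
      simp [List.getElem_take]
    have hd2 : (H.take m).drop (k+1) = H[k+1]'(by omega) :: (H.take m).drop (k+2) := by
      rw [List.drop_eq_getElem_cons (by omega)]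
      congr 1
      simp [List.getElem_take]
    have hrne : rightsF ((H.take m).drop (k+1)) ≠ [] := by
      apply rightsF_ne_nil
      rw [hd2]; simp
    obtain ⟨x0, X', hX⟩ := List.exists_cons_of_ne_nil hrne
    -- the two Heights reads
    have eH1 : PySem.List.pyGetD H ((k : Int) + 1) 0 = H[k+1]'(by omega) := by
      rw [show ((k : Int) + 1) = ((k+1 : Nat) : Int) by push_cast; ring,
          PySem.List.pyGetD_natCast, List.getD_eq_getElem _ _ (by omega)]
    have eH2 : PySem.List.pyGetD H (k : Int) 0 = H[k]'(by omega) := by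
      rw [PySem.List.pyGetD_natCast, List.getD_eq_getElem _ _ (by omega)]
    -- the read of rights[i+1]
    have eR : PySem.List.pyGetD (List.replicate (k+1) (-1) ++ rightsF ((H.take m).drop (k+1))) ((k : Int) + 1) 0
        = (rightsF ((H.take m).drop (k+1))).headI := by
      rw [show ((k : Int) + 1) = ((k+1 : Nat) : Int) by push_cast; ring,
          PySem.List.pyGetD_natCast,
          List.getD_eq_getElem _ _ (by rw [hX]; simp),
          List.getElem_append_right (by simp)]
      simp [hX]
    -- the write rights[i] = v
    have eSet : ∀ v : Int,
        PySem.List.pySetD (List.replicate (k+1) (-1) ++ rightsF ((H.take m).drop (k+1))) (k : Int) v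
          = List.replicate k (-1) ++ (v :: rightsF ((H.take m).drop (k+1))) := by
      intro v
      rw [PySem.List.pySetD_natCast, List.set_append]
      rw [if_pos (by simp)]
      rw [List.replicate_succ', List.set_append, if_neg (by simp), List.length_replicate]
      simp
    -- unfold one step of rightsF on the other side
    have hrw : rightsF ((H.take m).drop k) =
        (if H[k+1]'(by omega) < H[k]'(by omega) then (rightsF ((H.take m).drop (k+1))).headI + 1 else 1)
          :: rightsF ((H.take m).drop (k+1)) := by
      rw [hd1, hd2]
      rfl
    by_cases hc : H[k+1]'(by omega) < H[k]'(by omega)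
    · rw [if_pos (by rw [eH1, eH2]; exact hc), eR, eSet,
          show ((rightsF ((H.take m).drop (k+1))).headI + 1) :: rightsF ((H.take m).drop (k+1))
            = rightsF ((H.take m).drop k) by rw [hrw, if_pos hc]]
      exact ih (by omega)
    · rw [if_neg (by rw [eH1, eH2]; exact hc), eSet,
          show (1 : Int) :: rightsF ((H.take m).drop (k+1))
            = rightsF ((H.take m).drop k) by rw [hrw, if_neg hc]]
      exact ih (by omega)

theorem sum_loop (m : Nat) (l r : List Int) (hl : l.length = m) (hr : r.length = m) :
    (PySem.List.pyRange 0 (m : Int) 1).foldl (fun sum_ i =>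
      sum_ + max (PySem.List.pyGetD l i 0) (PySem.List.pyGetD r i 0)) 0 =
    (List.zipWith max l r).sum := by
  rw [PySem.List.foldl_add _ (fun i => max (PySem.List.pyGetD l i 0) (PySem.List.pyGetD r i 0)) 0]
  rw [show (List.map (fun i => max (PySem.List.pyGetD l i 0) (PySem.List.pyGetD r i 0))
        (PySem.List.pyRange 0 (m : Int) 1)) = List.zipWith max l r from ?_]
  · ring
  · apply List.ext_getElem
    · simp [PySem.List.length_pyRange_one, hl, hr]
    · intro j h1 h2
      simp only [List.getElem_map]
      rw [PySem.List.getElem_pyRange_one _ _ j (by simpa using h1)]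
      rw [show (0 : Int) + (j : Int) = ((j : Nat) : Int) by ring]
      have hj : j < m := by
        simpa [PySem.List.length_pyRange_one] using h1
      rw [PySem.List.pyGetD_natCast, PySem.List.pyGetD_natCast,
          List.getD_eq_getElem _ _ (by omega), List.getD_eq_getElem _ _ (by omega),
          List.getElem_zipWith]

-- rights[-1] = v  (exact for nonempty lists, the only case Pre_ admits)
theorem pySetD_neg_one_eq (xs : List Int) (v : Int) (hx : xs ≠ []) :
    PySem.List.pySetD xs (-1) v = xs.set (xs.length - 1) v := by
  have hlen : 1 ≤ xs.length := List.length_pos_iff.mpr hx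
  have h1 : (-(xs.length : Int) ≤ -1) := by omega
  simp [PySem.List.pySetD, PySem.List.pySet?, PySem.List.pyIdx?, h1]

theorem A_eq_sumLR (n : Int) (H : List Int) (h1 : 1 ≤ n) (h2 : n ≤ (H.length : Int)) :
    lin_temple_offering n H = sumLR (H.take n.toNat) := by
  obtain ⟨m, hm⟩ : ∃ m : Nat, (m : Int) = n := ⟨n.toNat, Int.toNat_of_nonneg (by omega)⟩
  subst hm
  have hm1 : 1 ≤ m := by exact_mod_cast h1
  have hlen : m ≤ H.length := by exact_mod_cast h2
  have hH'len : (H.take m).length = m := by simp only [List.length_take]; omega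
  have hinit : (PySem.List.pyRange 0 (m : Int) 1).map (fun _ => (-1 : Int))
      = List.replicate m (-1) := by
    rw [List.map_const']
    congr 1
    rw [PySem.List.length_pyRange_one]
    omega
  have hlefts1 : PySem.List.pySetD (List.replicate m (-1 : Int)) 0 1
      = (1 : Int) :: List.replicate (m - 1) (-1) := by
    rw [show (0 : Int) = ((0 : Nat) : Int) from rfl, PySem.List.pySetD_natCast,
        show m = (m - 1) + 1 by omega, List.replicate_succ]
    simp
  have hrights1 : PySem.List.pySetD (List.replicate m (-1 : Int)) (-1) 1
      = List.replicate (m - 1) (-1) ++ [1] := by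
    rw [pySetD_neg_one_eq _ _ (by simp; omega), List.length_replicate,
        show List.replicate m (-1 : Int) = List.replicate (m - 1) (-1) ++ [-1] by
          rw [← List.replicate_succ', show (m - 1) + 1 = m by omega],
        List.set_append, if_neg (by simp), List.length_replicate]
    simp
  have hdrop : rightsF ((H.take m).drop (m - 1)) = [1] := by
    rw [List.drop_eq_getElem_cons (by omega),
        show (m - 1) + 1 = m by omega,
        List.drop_eq_nil_of_le (by omega)]
    rfl
  have hll : (leftsF (H.take m)).length = m := by rw [leftsF_length, hH'len]
  have hrl : (rightsF (H.take m)).length = m := by rw [rightsF_length, hH'len]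
  simp only [lin_temple_offering, Int.toNat_natCast]
  rw [hinit, hlefts1, hrights1,
      lefts_loop H m hm1 hlen m hm1 (le_refl m),
      Nat.sub_self, List.replicate_zero, List.append_nil,
      show ((m : Int) - 2) = ((m - 1 : Nat) : Int) - 1 by push_cast [Nat.cast_sub hm1]; ring,
      show (List.replicate (m - 1) (-1 : Int) ++ [1])
        = List.replicate (m - 1) (-1) ++ rightsF ((H.take m).drop (m - 1)) by rw [hdrop],
      rights_loop H m hm1 hlen (m - 1) (le_refl _),
      sum_loop m _ _ hll hrl]
  rfl

theorem B_loop (H : List Int) (m : Nat) (hlen : m ≤ H.length) :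
    ∀ j k, k + j = m → 1 ≤ k → ∀ (t u d p : Int),
      ((PySem.List.pyRange (k : Int) (m : Int) 1).foldl (fun (st : Int × Int × Int × Int) i =>
        let (total, up, down, peak) := st
        if PySem.List.pyGetD H (i-1) 0 < PySem.List.pyGetD H i 0 then
          (total + 1 + (up + 1), up + 1, 0, up + 1)
        else if PySem.List.pyGetD H (i-1) 0 = PySem.List.pyGetD H i 0 then
          (total + 1, 0, 0, 0)
        else
          (total + 1 + (down + 1) - (if peak ≥ down + 1 then 1 else 0), 0, down + 1, peak))
        (t, u, d, p)).1
      = candyGo (PySem.List.pyGetD H ((k : Int) - 1) 0) u d p t ((H.take m).drop k) := by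
  intro j
  induction j with
  | zero =>
    intro k hk _ t u d p
    have hkm : k = m := by omega
    subst hkm
    rw [PySem.List.pyRange_one_eq_nil (le_refl _), List.drop_eq_nil_of_le (by simp)]
    rfl
  | succ j ih =>
    intro k hk hk1 t u d p
    have hkm : k < m := by omega
    have hklen : k < H.length := by omega
    rw [PySem.List.pyRange_one_cons (by exact_mod_cast hkm), List.foldl_cons]
    have eH : PySem.List.pyGetD H (k : Int) 0 = H[k]'(by omega) := by
      rw [PySem.List.pyGetD_natCast, List.getD_eq_getElem _ _ (by omega)]
    have hdk : (H.take m).drop k = H[k]'(by omega) :: (H.take m).drop (k+1) := by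
      rw [List.drop_eq_getElem_cons (by simp only [List.length_take]; omega)]
      congr 1
      simp [List.getElem_take]
    have ecast : ((k : Int) + 1) = ((k + 1 : Nat) : Int) := by push_cast; ring
    have eprev : PySem.List.pyGetD H (((k + 1 : Nat) : Int) - 1) 0 = H[k]'(by omega) := by
      rw [show (((k + 1 : Nat) : Int) - 1) = ((k : Nat) : Int) by push_cast; ring]
      exact eH
    rw [hdk]
    by_cases hc1 : PySem.List.pyGetD H ((k : Int) - 1) 0 < H[k]'(by omega)
    · simp only [eH, ecast, ih (k+1) (by omega) (by omega), eprev, candyGo, if_pos hc1]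
    · by_cases hc2 : PySem.List.pyGetD H ((k : Int) - 1) 0 = H[k]'(by omega)
      · simp only [eH, if_neg hc1, if_pos hc2, ecast, ih (k+1) (by omega) (by omega), eprev,
          candyGo]
      · simp only [eH, if_neg hc1, if_neg hc2, ecast, ih (k+1) (by omega) (by omega), eprev,
          candyGo]

theorem B_eq_sumLR (n : Int) (H : List Int) (h1 : 1 ≤ n) (h2 : n ≤ (H.length : Int)) :
    lin_temple_offering_alt n H = sumLR (H.take n.toNat) := by
  obtain ⟨m, hm⟩ : ∃ m : Nat, (m : Int) = n := ⟨n.toNat, Int.toNat_of_nonneg (by omega)⟩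
  subst hm
  have hm1 : 1 ≤ m := by exact_mod_cast h1
  have hlen : m ≤ H.length := by exact_mod_cast h2
  have h0len : 0 < H.length := by omega
  simp only [lin_temple_offering_alt, Int.toNat_natCast]
  have hb := B_loop H m hlen (m - 1) 1 (by omega) (le_refl 1) 1 0 0 0
  simp only [Nat.cast_one, show (1 : Int) - 1 = 0 from rfl] at hb
  rw [hb]
  have h0 : PySem.List.pyGetD H 0 0 = H[0]'h0len := by
    rw [show (0 : Int) = ((0 : Nat) : Int) from rfl, PySem.List.pyGetD_natCast,
        List.getD_eq_getElem _ _ h0len]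
  have hQ : H[0]'h0len :: (H.take m).drop 1 = H.take m := by
    have hc := List.drop_eq_getElem_cons (l := H.take m) (i := 0)
      (by simp only [List.length_take]; omega)
    simp only [List.drop_zero, List.getElem_take, Nat.zero_add] at hc
    exact hc.symm
  have hinv : CandyInv [H[0]'h0len] 0 0 0 1 := ?_
  · have main := candyGo_sumLR ((H.take m).drop 1) [H[0]'h0len] (H[0]'h0len) 0 0 0 1 (by simp) hinv
    rw [h0, main, show ([H[0]'h0len] : List Int) ++ (H.take m).drop 1 = H.take m by simpa using hQ]
  refine ⟨0, 0, 0, [], [], rfl, rfl, rfl, by norm_num [leftsF, leftsGo], by norm_num [rightsF, descList], rfl, by intro j hj; simp at hj, by norm_num [leftsF, leftsGo], by norm_num [sumLR, leftsF, leftsGo, rightsF]⟩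

theorem A_one (H : List Int) : lin_temple_offering 1 H = 1 := by
  norm_num [lin_temple_offering, show (PySem.List.pyRange 0 1 1) = [0] from rfl,
    show (PySem.List.pyRange 1 1 1) = [] from rfl,
    show (PySem.List.pyRange (-1) (-1) (-1)) = [] from rfl,
    PySem.List.pySetD, PySem.List.pySet?, PySem.List.pyIdx?, PySem.List.pyGetD,
    PySem.List.pyGet?]

theorem B_one (H : List Int) : lin_temple_offering_alt 1 H = 1 := by
  norm_num [lin_temple_offering_alt, show (PySem.List.pyRange 1 1 1) = [] from rfl]

-- ===== VERDICT (by name: the statement is the Claim_ definition above) =====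
theorem lin_temple_offering_spec : Claim_equal_lin_temple_offering := by
  intro n H _ hpre
  unfold Spec_lin_temple_offering
  rcases hpre with ⟨h1, h2 | h2⟩
  · rw [A_eq_sumLR n H h1 h2, B_eq_sumLR n H h1 h2]
  · subst h2
    rw [A_one, B_one]
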